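-- pv_equiv track=rewrite | github.com/mitfusco98/health-prep | document_upload_with_fhir.py | extract_fhir_metadata_from_form
-- ===== SOURCE A (Python) =====
-- def extract_fhir_metadata_from_form(form_data):
--     """
--     Extract FHIR-relevant metadata from form submission.
--
--     Args:
--         form_data: Form data dictionary
--
--     Returns:
--         Dictionary with FHIR metadata fields
--     """
--     fhir_data = {}
--
--     # Lab Results specific fields
--     if form_data.get('document_type') == 'Lab Results':
--         fhir_data.update({
--             'test_type': form_data.get('lab_test_type', 'General'),
--             'lab_id': form_data.get('lab_id'),
--             'lab_status': form_data.get('lab_status', 'final'),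
--             'lab_equipment': form_data.get('lab_equipment'),
--             'reference_range': form_data.get('reference_range')
--         })
--
--     # Imaging specific fields
--     elif form_data.get('document_type') in ['Imaging', 'Radiology']:
--         fhir_data.update({
--             'modality': form_data.get('imaging_modality', 'XRAY'),
--             'body_part': form_data.get('body_part', 'Chest'),
--             'study_type': form_data.get('study_type', 'Diagnostic'),
--             'contrast_used': form_data.get('contrast_used'),
--             'radiation_dose': form_data.get('radiation_dose')
--         })
--
--     # Clinical Notes specific fields
--     elif form_data.get('document_type') in ['Progress Notes', 'Consultation', 'Discharge Summary']:
--         fhir_data.update({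
--             'specialty': form_data.get('specialty'),
--             'encounter_type': form_data.get('encounter_type'),
--             'chief_complaint': form_data.get('chief_complaint')
--         })
--
--     # Common fields for all document types
--     fhir_data.update({
--         'priority': form_data.get('priority', 'routine'),
--         'confidentiality': form_data.get('confidentiality', 'normal'),
--         'workflow_status': form_data.get('workflow_status', 'completed')
--     })
--
--     # Remove None values
--     return {k: v for k, v in fhir_data.items() if v is not None}
-- ===== SOURCE B (Python) =====
-- _LAB_SPEC = [
--     ('test_type', 'lab_test_type', 'General'),
--     ('lab_id', 'lab_id', None),
--     ('lab_status', 'lab_status', 'final'),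
--     ('lab_equipment', 'lab_equipment', None),
--     ('reference_range', 'reference_range', None),
-- ]
-- _IMAGING_SPEC = [
--     ('modality', 'imaging_modality', 'XRAY'),
--     ('body_part', 'body_part', 'Chest'),
--     ('study_type', 'study_type', 'Diagnostic'),
--     ('contrast_used', 'contrast_used', None),
--     ('radiation_dose', 'radiation_dose', None),
-- ]
-- _NOTES_SPEC = [
--     ('specialty', 'specialty', None),
--     ('encounter_type', 'encounter_type', None),
--     ('chief_complaint', 'chief_complaint', None),
-- ]
-- _COMMON_SPEC = [
--     ('priority', 'priority', 'routine'),
--     ('confidentiality', 'confidentiality', 'normal'),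
--     ('workflow_status', 'workflow_status', 'completed'),
-- ]
-- _SPECS = {
--     'Lab Results': _LAB_SPEC,
--     'Imaging': _IMAGING_SPEC,
--     'Radiology': _IMAGING_SPEC,
--     'Progress Notes': _NOTES_SPEC,
--     'Consultation': _NOTES_SPEC,
--     'Discharge Summary': _NOTES_SPEC,
-- }
--
--
-- def extract_fhir_metadata_from_form(form_data):
--     spec = _SPECS.get(form_data.get('document_type'), []) + _COMMON_SPEC
--     result = {}
--     for out_key, form_key, default in spec:
--         v = form_data.get(form_key, default)
--         if v is not None:
--             result[out_key] = v
--     return result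
-- ===== Notes on version B (the rewrite author's own statement) =====
-- stated objective: simpler
-- what changed: Replaces the if/elif dispatch over three hand-written dict.update blocks by a lookup table mapping each document_type to a list of (output_key, form_key, default) specs (Imaging/Radiology and the three note types share a spec), concatenated with a common spec and processed by one uniform get-and-filter loop.
import Mathlib
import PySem

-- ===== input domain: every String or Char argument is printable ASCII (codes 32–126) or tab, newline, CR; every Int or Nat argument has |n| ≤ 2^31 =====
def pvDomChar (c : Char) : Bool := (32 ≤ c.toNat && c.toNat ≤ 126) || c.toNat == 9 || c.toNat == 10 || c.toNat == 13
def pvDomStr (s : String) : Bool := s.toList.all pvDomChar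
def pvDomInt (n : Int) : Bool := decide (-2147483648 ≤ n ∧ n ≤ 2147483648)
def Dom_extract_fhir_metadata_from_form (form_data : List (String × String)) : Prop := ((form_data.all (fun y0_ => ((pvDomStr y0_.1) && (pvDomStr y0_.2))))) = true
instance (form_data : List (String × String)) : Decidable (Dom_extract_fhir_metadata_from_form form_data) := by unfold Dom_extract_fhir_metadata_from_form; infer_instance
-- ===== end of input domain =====

-- B replaces A's if/elif dispatch over hand-written dict.update blocks by a lookup table of
-- (output_key, form_key, default) specs plus one uniform loop (objective: simpler).

-- ===== PORT A =====
-- values of fhir_data are Option String: 'none' is Python's None (filtered at the end)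
def extract_fhir_metadata_from_form (form_data : List (String × String)) : List (String × String) :=
  let g := PySem.Dict.mk form_data
  let fhir : PySem.Dict String (Option String) := PySem.Dict.empty
  let fhir :=
    if g.get? "document_type" == some "Lab Results" then
      fhir.update [("test_type", some (g.getD "lab_test_type" "General")),
                   ("lab_id", g.get? "lab_id"),
                   ("lab_status", some (g.getD "lab_status" "final")),
                   ("lab_equipment", g.get? "lab_equipment"),
                   ("reference_range", g.get? "reference_range")]
    -- 'in ['Imaging', 'Radiology']': list membership (None is in no list of strings)
    else if [some "Imaging", some "Radiology"].contains (g.get? "document_type") then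
      fhir.update [("modality", some (g.getD "imaging_modality" "XRAY")),
                   ("body_part", some (g.getD "body_part" "Chest")),
                   ("study_type", some (g.getD "study_type" "Diagnostic")),
                   ("contrast_used", g.get? "contrast_used"),
                   ("radiation_dose", g.get? "radiation_dose")]
    else if [some "Progress Notes", some "Consultation", some "Discharge Summary"].contains (g.get? "document_type") then
      fhir.update [("specialty", g.get? "specialty"),
                   ("encounter_type", g.get? "encounter_type"),
                   ("chief_complaint", g.get? "chief_complaint")]
    else fhir
  let fhir := fhir.update [("priority", some (g.getD "priority" "routine")),
                           ("confidentiality", some (g.getD "confidentiality" "normal")),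
                           ("workflow_status", some (g.getD "workflow_status" "completed"))]
  -- {k: v for k, v in fhir_data.items() if v is not None}: keys of fhir_data are already
  -- distinct, so the comprehension is the filtered items list
  fhir.items.filterMap (fun p => match p.2 with | some v => some (p.1, v) | none => none)

-- ===== PORT B =====
-- spec entry = (output_key, form_key, default); default 'none' = Python None
def pvLabSpec : List (String × String × Option String) :=
  [("test_type", "lab_test_type", some "General"),
   ("lab_id", "lab_id", none),
   ("lab_status", "lab_status", some "final"),
   ("lab_equipment", "lab_equipment", none),
   ("reference_range", "reference_range", none)]

def pvImagingSpec : List (String × String × Option String) :=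
  [("modality", "imaging_modality", some "XRAY"),
   ("body_part", "body_part", some "Chest"),
   ("study_type", "study_type", some "Diagnostic"),
   ("contrast_used", "contrast_used", none),
   ("radiation_dose", "radiation_dose", none)]

def pvNotesSpec : List (String × String × Option String) :=
  [("specialty", "specialty", none),
   ("encounter_type", "encounter_type", none),
   ("chief_complaint", "chief_complaint", none)]

def pvCommonSpec : List (String × String × Option String) :=
  [("priority", "priority", some "routine"),
   ("confidentiality", "confidentiality", some "normal"),
   ("workflow_status", "workflow_status", some "completed")]

def pvSpecs : PySem.Dict String (List (String × String × Option String)) :=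
  PySem.Dict.ofList
    [("Lab Results", pvLabSpec),
     ("Imaging", pvImagingSpec),
     ("Radiology", pvImagingSpec),
     ("Progress Notes", pvNotesSpec),
     ("Consultation", pvNotesSpec),
     ("Discharge Summary", pvNotesSpec)]

def extract_fhir_metadata_from_form_alt (form_data : List (String × String)) : List (String × String) :=
  let g := PySem.Dict.mk form_data
  -- _SPECS.get(form_data.get('document_type'), []): a None key matches no string key
  let spec := (match g.get? "document_type" with
               | some t => pvSpecs.getD t []
               | none => []) ++ pvCommonSpec
  -- the output keys of any spec ++ _COMMON_SPEC are pairwise distinct, so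
  -- 'result[out_key] = v' always appends a fresh key: the result dict is this list
  spec.foldl (fun acc s =>
    match (g.get? s.2.1).or s.2.2 with
    | some v => acc ++ [(s.1, v)]
    | none => acc) []

-- ===== PRECONDITION & SPEC =====
def Spec_extract_fhir_metadata_from_form (form_data : List (String × String)) (out : List (String × String)) : Prop := out = extract_fhir_metadata_from_form_alt form_data
instance (form_data : List (String × String)) (out : List (String × String)) : Decidable (Spec_extract_fhir_metadata_from_form form_data out) := by unfold Spec_extract_fhir_metadata_from_form; infer_instance

-- ===== CLAIM (what is proved, stated in full; the proofs are below) =====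
def Claim_equal_extract_fhir_metadata_from_form : Prop := ∀ (form_data : List (String × String)), Dom_extract_fhir_metadata_from_form form_data → Spec_extract_fhir_metadata_from_form form_data (extract_fhir_metadata_from_form form_data)

-- ===== LEMMAS AND PROOFS =====

-- ===== VERDICT (by name: the statement is the Claim_ definition above) =====
theorem extract_fhir_metadata_from_form_spec : Claim_equal_extract_fhir_metadata_from_form := by
  intro fd _
  unfold Spec_extract_fhir_metadata_from_form extract_fhir_metadata_from_form
    extract_fhir_metadata_from_form_alt
  cases hdt : (PySem.Dict.mk fd).get? "document_type" with
  | none =>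
    simp [hdt, pvCommonSpec, PySem.Dict.update, PySem.Dict.insert, PySem.Dict.empty,
          PySem.Dict.contains, PySem.Dict.getD_eq_get?_getD, List.foldl]
  | some t =>
    by_cases h1 : t = "Lab Results"
    · subst h1
      simp [hdt, pvSpecs, pvLabSpec, pvCommonSpec, PySem.Dict.ofList, PySem.Dict.update,
            PySem.Dict.insert, PySem.Dict.empty, PySem.Dict.contains, PySem.Dict.getD_eq_get?_getD,
            PySem.Dict.get?_mk_cons, List.foldl]
      cases (PySem.Dict.mk fd).get? "lab_id" <;>
        cases (PySem.Dict.mk fd).get? "lab_equipment" <;>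
          cases (PySem.Dict.mk fd).get? "reference_range" <;> simp
    · by_cases h2 : t = "Imaging"
      · subst h2
        simp [hdt, pvSpecs, pvImagingSpec, pvCommonSpec, PySem.Dict.ofList, PySem.Dict.update,
            PySem.Dict.insert, PySem.Dict.empty, PySem.Dict.contains, PySem.Dict.getD_eq_get?_getD,
            PySem.Dict.get?_mk_cons, List.foldl]
        cases (PySem.Dict.mk fd).get? "contrast_used" <;>
          cases (PySem.Dict.mk fd).get? "radiation_dose" <;> simp
      · by_cases h3 : t = "Radiology"
        · subst h3
          simp [hdt, pvSpecs, pvImagingSpec, pvCommonSpec, PySem.Dict.ofList, PySem.Dict.update,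
            PySem.Dict.insert, PySem.Dict.empty, PySem.Dict.contains, PySem.Dict.getD_eq_get?_getD,
            PySem.Dict.get?_mk_cons, List.foldl]
          cases (PySem.Dict.mk fd).get? "contrast_used" <;>
            cases (PySem.Dict.mk fd).get? "radiation_dose" <;> simp
        · by_cases h4 : t = "Progress Notes"
          · subst h4
            simp [hdt, pvSpecs, pvNotesSpec, pvCommonSpec, PySem.Dict.ofList, PySem.Dict.update,
            PySem.Dict.insert, PySem.Dict.empty, PySem.Dict.contains, PySem.Dict.getD_eq_get?_getD,
            PySem.Dict.get?_mk_cons, List.foldl]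
            cases (PySem.Dict.mk fd).get? "specialty" <;>
              cases (PySem.Dict.mk fd).get? "encounter_type" <;>
                cases (PySem.Dict.mk fd).get? "chief_complaint" <;> simp
          · by_cases h5 : t = "Consultation"
            · subst h5
              simp [hdt, pvSpecs, pvNotesSpec, pvCommonSpec, PySem.Dict.ofList, PySem.Dict.update,
            PySem.Dict.insert, PySem.Dict.empty, PySem.Dict.contains, PySem.Dict.getD_eq_get?_getD,
            PySem.Dict.get?_mk_cons, List.foldl]
              cases (PySem.Dict.mk fd).get? "specialty" <;>
                cases (PySem.Dict.mk fd).get? "encounter_type" <;>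
                  cases (PySem.Dict.mk fd).get? "chief_complaint" <;> simp
            · by_cases h6 : t = "Discharge Summary"
              · subst h6
                simp [hdt, pvSpecs, pvNotesSpec, pvCommonSpec, PySem.Dict.ofList, PySem.Dict.update,
            PySem.Dict.insert, PySem.Dict.empty, PySem.Dict.contains, PySem.Dict.getD_eq_get?_getD,
            PySem.Dict.get?_mk_cons, List.foldl]
                cases (PySem.Dict.mk fd).get? "specialty" <;>
                  cases (PySem.Dict.mk fd).get? "encounter_type" <;>
                    cases (PySem.Dict.mk fd).get? "chief_complaint" <;> simp
              · simp [hdt, pvSpecs, pvCommonSpec, PySem.Dict.ofList, PySem.Dict.update,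
            PySem.Dict.insert, PySem.Dict.empty, PySem.Dict.contains, PySem.Dict.getD_eq_get?_getD,
            PySem.Dict.get?_mk_cons, List.foldl, h1, h2, h3, h4, h5, h6,
                      Ne.symm h1, Ne.symm h2, Ne.symm h3, Ne.symm h4, Ne.symm h5, Ne.symm h6]
                simp [PySem.Dict.get?]
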